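-- pv_equiv track=rewrite | github.com/MykytaX/AoC | 2022/Day 11/day11.py | factorizer
-- ===== SOURCE A (Python) =====
-- list = [2,3,5,7,11,13,17,19,23]
--
-- def factorizer(item, dictx = {"23": 0, "11":0, "7":0, "3":0, "5":0, "17": 0, "13":0, "19":0, "2":0,"1":0}):
--     newdict = dict(dictx)
--     item = int(item)
--     done = False
--     for key in newdict:
--         newdict[key] = 0
--     while done == False:
--         i = 0
--         while int(item)%list[i] != 0:
--             i += 1
--             if i == len(list) or item == 1:
--                 done = True
--                 newdict.update({"1": item})
--                 break
--         else:
--             if str(list[i]) in newdict: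
--                 newdict[str(list[i])] += 1
--         if done == True:
--             break
--         else:
--             item = int(item // list[i])
--     return newdict
-- ===== SOURCE B (Python) =====
-- list = [2,3,5,7,11,13,17,19,23]
--
-- def factorizer(item, dictx = {"23": 0, "11":0, "7":0, "3":0, "5":0, "17": 0, "13":0, "19":0, "2":0,"1":0}):
--     newdict = {key: 0 for key in dictx}
--     item = int(item)
--     for p in list:
--         while item % p == 0:
--             if str(p) in newdict:
--                 newdict[str(p)] += 1
--             item //= p
--     newdict["1"] = item
--     return newdict
-- ===== Notes on version B (the rewrite author's own statement) =====
-- stated objective: simpler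
-- what changed: A repeatedly rescans the prime list from the top to find the least dividing prime, divides once, and restarts (with a while-else done flag); B makes one ascending pass over the fixed prime list, stripping all powers of each prime in an inner while, then stores the residual under '1'.
import Mathlib
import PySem

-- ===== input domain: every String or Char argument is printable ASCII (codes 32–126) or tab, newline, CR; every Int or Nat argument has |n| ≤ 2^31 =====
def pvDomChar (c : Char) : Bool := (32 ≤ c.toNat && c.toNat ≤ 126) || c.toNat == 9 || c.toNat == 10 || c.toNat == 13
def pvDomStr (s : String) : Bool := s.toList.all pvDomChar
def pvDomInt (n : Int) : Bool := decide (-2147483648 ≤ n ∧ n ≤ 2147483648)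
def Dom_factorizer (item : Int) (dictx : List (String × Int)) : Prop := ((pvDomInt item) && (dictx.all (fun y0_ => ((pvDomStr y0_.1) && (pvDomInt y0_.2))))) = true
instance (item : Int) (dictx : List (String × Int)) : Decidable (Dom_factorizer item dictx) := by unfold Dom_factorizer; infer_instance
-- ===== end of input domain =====

-- B replaces A's restart-from-the-top scan (find the least dividing prime, divide once, rescan)
-- by a single ascending pass over the prime list stripping all powers of each prime (objective: simpler).
-- Both programs loop forever on item == 0; Pre_ excludes it.

-- ===== PORT A =====
def pvPrimes : List Int := [2, 3, 5, 7, 11, 13, 17, 19, 23]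

-- inner `while int(item)%list[i] != 0: …` loop; `none` = the `done = True` break fired
def pvInner (item : Int) (i : Nat) : Option Nat :=
  if _h : i < 9 then
    if PySem.Int.mod item (pvPrimes[i]!) ≠ 0 then
      if i + 1 = 9 ∨ item = 1 then none
      else pvInner item (i + 1)
    else some i
  else none   -- unreachable: the loop breaks before i reaches 9
  termination_by 9 - i

-- outer `while done == False` loop; fuel bounds the number of divisions (|item|+1 is enough; 0 only for item = 0, excluded by Pre_)
def pvLoopA : Nat → Int → PySem.Dict String Int → PySem.Dict String Int
  | 0, _, d => d
  | f + 1, item, d =>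
    match pvInner item 0 with
    | none => d.insert "1" item
    | some i =>
      let p := pvPrimes[i]!
      let d' := if d.contains (PySem.Int.toStr p) then d.modify (PySem.Int.toStr p) 0 (· + 1) else d
      pvLoopA f (PySem.Int.floordiv item p) d'

def factorizer (item : Int) (dictx : List (String × Int)) : List (String × Int) :=
  let nd := PySem.Dict.ofList dictx
  let nd := nd.keys.foldl (fun d k => d.insert k 0) nd   -- for key in newdict: newdict[key] = 0
  (pvLoopA (item.natAbs + 1) item nd).items

-- ===== PORT B =====
-- `while item % p == 0: …` (same fuel bound; fuel 0 is only reached for item = 0, excluded by Pre_)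
def pvStrip : Nat → Int → Int → PySem.Dict String Int → Int × PySem.Dict String Int
  | 0, _, item, d => (item, d)
  | f + 1, p, item, d =>
    if PySem.Int.mod item p = 0 then
      let d' := if d.contains (PySem.Int.toStr p) then d.modify (PySem.Int.toStr p) 0 (· + 1) else d
      pvStrip f p (PySem.Int.floordiv item p) d'
    else (item, d)

def factorizer_alt (item : Int) (dictx : List (String × Int)) : List (String × Int) :=
  let nd := (PySem.Dict.ofList dictx).keys.foldl (fun d k => d.insert k 0) PySem.Dict.empty  -- {key: 0 for key in dictx}
  let st := pvPrimes.foldl (fun st p => pvStrip (item.natAbs + 1) p st.1 st.2) (item, nd)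
  (st.2.insert "1" st.1).items

-- ===== PRECONDITION & SPEC =====
-- Pre_ excludes item = 0, the one input on which A (and B) loops forever and returns nothing.
def Pre_factorizer (item : Int) (dictx : List (String × Int)) : Prop := item ≠ 0
instance (item : Int) (dictx : List (String × Int)) : Decidable (Pre_factorizer item dictx) := by unfold Pre_factorizer; infer_instance
def pvWitness_factorizer : Int × (List (String × Int)) := (12, [("2", 5), ("3", 7), ("1", 1), ("x", 2)])

def Spec_factorizer (item : Int) (dictx : List (String × Int)) (out : List (String × Int)) : Prop := out = factorizer_alt item dictx
instance (item : Int) (dictx : List (String × Int)) (out : List (String × Int)) : Decidable (Spec_factorizer item dictx out) := by unfold Spec_factorizer; infer_instance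

-- ===== CLAIM (what is proved, stated in full; the proofs are below) =====
def Claim_equal_factorizer : Prop := ∀ (item : Int) (dictx : List (String × Int)), Dom_factorizer item dictx → Pre_factorizer item dictx → Spec_factorizer item dictx (factorizer item dictx)

-- ===== LEMMAS AND PROOFS =====

-- B's pass over the primes, by index (proof-only view of B's foldl)
def pvRunB (fB : Nat) (j : Nat) (item : Int) (d : PySem.Dict String Int) : PySem.Dict String Int :=
  if _h : j < 9 then
    let st := pvStrip fB (pvPrimes[j]!) item d
    pvRunB fB (j + 1) st.1 st.2
  else d.insert "1" item
  termination_by 9 - j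

theorem pvPrimes_pos : ∀ i, i < 9 → (2 : Int) ≤ pvPrimes[i]! := by decide

-- division by a dividing prime: exact quotient, strictly smaller, nonzero
theorem pvDiv_step {item p : Int} (hp : 2 ≤ p) (hi : item ≠ 0) (hd : p ∣ item) :
    p * PySem.Int.floordiv item p = item ∧ (PySem.Int.floordiv item p).natAbs < item.natAbs ∧ PySem.Int.floordiv item p ≠ 0 := by
  rw [PySem.Int.floordiv_eq_ediv_of_pos (by omega)]
  have heq : p * (item / p) = item := Int.mul_ediv_cancel' hd
  have hq0 : item / p ≠ 0 := by
    intro h0; rw [h0, mul_zero] at heq; exact hi heq.symm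
  refine ⟨heq, ?_, hq0⟩
  have : item.natAbs = p.natAbs * (item / p).natAbs := by
    conv_lhs => rw [← heq]
    rw [Int.natAbs_mul]
  have h2 : 2 ≤ p.natAbs := by omega
  have h1 : 1 ≤ (item / p).natAbs := Int.natAbs_pos.mpr hq0
  nlinarith

-- inner scan returns none iff no listed prime divides
theorem pvInner_none {item : Int} (j : Nat)
    (h : ∀ i, j ≤ i → i < 9 → ¬ pvPrimes[i]! ∣ item) : pvInner item j = none := by
  have H : ∀ k j, 9 - j ≤ k → (∀ i, j ≤ i → i < 9 → ¬ pvPrimes[i]! ∣ item) → pvInner item j = none := by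
    intro k
    induction k with
    | zero =>
      intro j hk h
      unfold pvInner
      rw [dif_neg (by omega)]
    | succ k ih =>
      intro j hk h
      unfold pvInner
      by_cases hj : j < 9
      · rw [dif_pos hj]
        have hm : PySem.Int.mod item (pvPrimes[j]!) ≠ 0 := by
          rw [Ne, PySem.Int.mod_eq_zero_iff_dvd]
          exact h j le_rfl hj
        rw [if_pos hm]
        by_cases hend : j + 1 = 9 ∨ item = 1
        · rw [if_pos hend]
        · rw [if_neg hend]
          exact ih (j + 1) (by omega) (fun i hi h9 => h i (by omega) h9)
      · rw [dif_neg hj]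
  exact H 9 j (by omega) h

theorem pvInner_some {item : Int} {i0 : Nat} (j : Nat) (hj : j ≤ i0) (hi0 : i0 < 9)
    (hdvd : pvPrimes[i0]! ∣ item) (hmin : ∀ i, i < i0 → ¬ pvPrimes[i]! ∣ item) :
    pvInner item j = some i0 := by
  have hne1 : item ≠ 1 := by
    intro h1
    have hp := pvPrimes_pos i0 hi0
    have := Int.le_of_dvd (by rw [h1]; norm_num) hdvd
    omega
  have H : ∀ k j, i0 - j ≤ k → j ≤ i0 → pvInner item j = some i0 := by
    intro k
    induction k with
    | zero =>
      intro j hk hj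
      have : j = i0 := by omega
      subst this
      unfold pvInner
      rw [dif_pos hi0]
      have hm : ¬ PySem.Int.mod item (pvPrimes[j]!) ≠ 0 := by
        simp only [ne_eq, not_not, PySem.Int.mod_eq_zero_iff_dvd]
        exact hdvd
      rw [if_neg hm]
    | succ k ih =>
      intro j hk hj
      by_cases hji : j = i0
      · subst hji
        unfold pvInner
        rw [dif_pos hi0]
        have hm : ¬ PySem.Int.mod item (pvPrimes[j]!) ≠ 0 := by
          simp only [ne_eq, not_not, PySem.Int.mod_eq_zero_iff_dvd]
          exact hdvd
        rw [if_neg hm]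
      · have hjlt : j < i0 := by omega
        unfold pvInner
        rw [dif_pos (by omega)]
        have hm : PySem.Int.mod item (pvPrimes[j]!) ≠ 0 := by
          rw [Ne, PySem.Int.mod_eq_zero_iff_dvd]
          exact hmin j hjlt
        rw [if_pos hm, if_neg (by omega : ¬ (j + 1 = 9 ∨ item = 1))]
        exact ih (j + 1) (by omega) (by omega)
  exact H i0 j (by omega) hj

-- a strip that finds no factor is the identity (any fuel)
theorem pvStrip_id {p item : Int} (h : ¬ p ∣ item) (f : Nat) (d : PySem.Dict String Int) :
    pvStrip f p item d = (item, d) := by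
  cases f with
  | zero => rfl
  | succ f =>
    unfold pvStrip
    rw [if_neg (by rw [PySem.Int.mod_eq_zero_iff_dvd]; exact h)]

-- strip is fuel-irrelevant above |item|
theorem pvStrip_fuel {p : Int} (hp : 2 ≤ p) :
    ∀ (n : Nat) (item : Int), item.natAbs ≤ n → item ≠ 0 → ∀ (d : PySem.Dict String Int) (f g : Nat),
      item.natAbs ≤ f → item.natAbs ≤ g → pvStrip f p item d = pvStrip g p item d := by
  intro n
  induction n with
  | zero =>
    intro item hn hi
    exact absurd (Int.natAbs_eq_zero.mp (by omega)) hi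
  | succ n ih =>
    intro item hn hi d f g hf hg
    by_cases hd : p ∣ item
    · have h1 : 1 ≤ item.natAbs := Int.natAbs_pos.mpr hi
      obtain ⟨f', rfl⟩ : ∃ f', f = f' + 1 := ⟨f - 1, by omega⟩
      obtain ⟨g', rfl⟩ : ∃ g', g = g' + 1 := ⟨g - 1, by omega⟩
      have hm : PySem.Int.mod item p = 0 := by rw [PySem.Int.mod_eq_zero_iff_dvd]; exact hd
      obtain ⟨_, hlt, hne⟩ := pvDiv_step hp hi hd
      unfold pvStrip
      rw [if_pos hm, if_pos hm]
      exact ih (PySem.Int.floordiv item p) (by omega) hne _ f' g' (by omega) (by omega)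
    · rw [pvStrip_id hd, pvStrip_id hd]

-- when no prime at index ≥ j divides, B's remaining pass just records the residue
theorem pvRunB_done {item : Int} (fB : Nat) (j : Nat)
    (h : ∀ i, j ≤ i → i < 9 → ¬ pvPrimes[i]! ∣ item) (d : PySem.Dict String Int) :
    pvRunB fB j item d = d.insert "1" item := by
  have H : ∀ k j, 9 - j ≤ k → (∀ i, j ≤ i → i < 9 → ¬ pvPrimes[i]! ∣ item) →
      ∀ d : PySem.Dict String Int, pvRunB fB j item d = d.insert "1" item := by
    intro k
    induction k with
    | zero =>
      intro j hk h d
      unfold pvRunB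
      rw [dif_neg (by omega)]
    | succ k ih =>
      intro j hk h d
      by_cases hj : j < 9
      · unfold pvRunB
        rw [dif_pos hj]
        simp only [pvStrip_id (h j le_rfl hj)]
        exact ih (j + 1) (by omega) (fun i hi h9 => h i (by omega) h9) d
      · unfold pvRunB
        rw [dif_neg hj]
  exact H 9 j (by omega) h d

-- B's pass skips primes that do not divide item
theorem pvRunB_skip {item : Int} (fB : Nat) {i0 : Nat} (hi0 : i0 ≤ 9)
    (hmin : ∀ i, i < i0 → ¬ pvPrimes[i]! ∣ item) :
    ∀ j, j ≤ i0 → ∀ d : PySem.Dict String Int, pvRunB fB j item d = pvRunB fB i0 item d := by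
  have H : ∀ k j, i0 - j ≤ k → j ≤ i0 → ∀ d : PySem.Dict String Int,
      pvRunB fB j item d = pvRunB fB i0 item d := by
    intro k
    induction k with
    | zero =>
      intro j hk hj d
      have : j = i0 := by omega
      subst this
      rfl
    | succ k ih =>
      intro j hk hj d
      by_cases hji : j = i0
      · subst hji; rfl
      · have hjlt : j < i0 := by omega
        conv_lhs => unfold pvRunB
        rw [dif_pos (by omega)]
        simp only [pvStrip_id (hmin j hjlt)]
        exact ih (j + 1) (by omega) (by omega) d
  exact fun j hj d => H i0 j (by omega) hj d

-- MAIN: A's loop equals B's pass from index j, given no prime below j divides item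
theorem pvMain : ∀ (n : Nat) (item : Int), item.natAbs ≤ n → item ≠ 0 →
    ∀ j, j ≤ 9 → (∀ i, i < j → ¬ pvPrimes[i]! ∣ item) →
    ∀ (d : PySem.Dict String Int) fA fB, item.natAbs < fA → item.natAbs ≤ fB →
      pvLoopA fA item d = pvRunB fB j item d := by
  intro n
  induction n using Nat.strong_induction_on with
  | _ n ih =>
  intro item hn hi j hj h d fA fB hfA hfB
  have h1 : 1 ≤ item.natAbs := Int.natAbs_pos.mpr hi
  obtain ⟨f, rfl⟩ : ∃ f, fA = f + 1 := ⟨fA - 1, by omega⟩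
  by_cases hex : ∃ i, i < 9 ∧ pvPrimes[i]! ∣ item
  · -- some listed prime divides: take the least one
    have hP : (Nat.find hex) < 9 ∧ pvPrimes[(Nat.find hex)]! ∣ item := Nat.find_spec hex
    set i0 := Nat.find hex with hi0def
    obtain ⟨hi09, hdvd⟩ := hP
    have hmin : ∀ i, i < i0 → ¬ pvPrimes[i]! ∣ item := by
      intro i hilt hd
      exact Nat.find_min hex hilt ⟨by omega, hd⟩
    have hji0 : j ≤ i0 := by
      by_contra hc
      exact h i0 (by omega) hdvd
    have hp := pvPrimes_pos i0 hi09
    obtain ⟨heq, hlt, hne⟩ := pvDiv_step hp hi hdvd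
    have hm : PySem.Int.mod item (pvPrimes[i0]!) = 0 := by
      rw [PySem.Int.mod_eq_zero_iff_dvd]; exact hdvd
    -- LHS: one outer iteration of A
    have hLHS : pvLoopA (f + 1) item d =
        pvLoopA f (PySem.Int.floordiv item (pvPrimes[i0]!))
          (if d.contains (PySem.Int.toStr (pvPrimes[i0]!))
            then d.modify (PySem.Int.toStr (pvPrimes[i0]!)) 0 (· + 1) else d) := by
      simp only [pvLoopA, pvInner_some 0 (Nat.zero_le i0) hi09 hdvd hmin]
    set item' := PySem.Int.floordiv item (pvPrimes[i0]!) with hitem'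
    set d' := (if d.contains (PySem.Int.toStr (pvPrimes[i0]!))
      then d.modify (PySem.Int.toStr (pvPrimes[i0]!)) 0 (· + 1) else d) with hd'
    have hmin' : ∀ i, i < i0 → ¬ pvPrimes[i]! ∣ item' := by
      intro i hilt hdq
      exact hmin i hilt (by rw [← heq]; exact hdq.mul_left _)
    obtain ⟨g, rfl⟩ : ∃ g, fB = g + 1 := ⟨fB - 1, by omega⟩
    -- RHS: skip to i0, do the first division of the strip there
    have hRHS : pvRunB (g + 1) j item d =
        pvRunB (g + 1) (i0 + 1) (pvStrip g (pvPrimes[i0]!) item' d').1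
          (pvStrip g (pvPrimes[i0]!) item' d').2 := by
      rw [pvRunB_skip (g + 1) (by omega) hmin j hji0 d]
      conv_lhs => unfold pvRunB
      rw [dif_pos hi09]
      simp only [pvStrip, if_pos hm]
      rfl
    rw [hLHS, hRHS]
    -- fold the strip step back into a pvRunB at i0 for item'
    have hfuel : pvStrip g (pvPrimes[i0]!) item' d' = pvStrip (g + 1) (pvPrimes[i0]!) item' d' :=
      pvStrip_fuel hp item'.natAbs item' le_rfl hne d' g (g + 1) (by omega) (by omega)
    have hRHS2 : pvRunB (g + 1) (i0 + 1) (pvStrip g (pvPrimes[i0]!) item' d').1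
          (pvStrip g (pvPrimes[i0]!) item' d').2 = pvRunB (g + 1) i0 item' d' := by
      rw [hfuel]
      conv_rhs => unfold pvRunB
      rw [dif_pos hi09]
    rw [hRHS2]
    exact ih item'.natAbs (by omega) item' le_rfl hne i0 (by omega) hmin' d' f (g + 1)
      (by omega) (by omega)
  · -- nothing divides: A records the residue, B's pass is the identity
    push Not at hex
    have hall : ∀ i, (0:Nat) ≤ i → i < 9 → ¬ pvPrimes[i]! ∣ item := fun i _ h9 => hex i h9
    have : pvLoopA (f + 1) item d = d.insert "1" item := by
      simp only [pvLoopA, pvInner_none 0 (fun i hi h9 => hex i h9)]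
    rw [this, pvRunB_done fB j (fun i hi h9 => hex i h9) d]

-- B's foldl is pvRunB 0
theorem pvAlt_runB (fB : Nat) (item : Int) (d : PySem.Dict String Int) :
    (pvPrimes.foldl (fun st p => pvStrip fB p st.1 st.2) (item, d)).2.insert "1"
      (pvPrimes.foldl (fun st p => pvStrip fB p st.1 st.2) (item, d)).1 = pvRunB fB 0 item d := by
  simp only [pvPrimes, List.foldl]
  unfold pvRunB; rw [dif_pos (by omega)]
  unfold pvRunB; rw [dif_pos (by omega)]
  unfold pvRunB; rw [dif_pos (by omega)]
  unfold pvRunB; rw [dif_pos (by omega)]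
  unfold pvRunB; rw [dif_pos (by omega)]
  unfold pvRunB; rw [dif_pos (by omega)]
  unfold pvRunB; rw [dif_pos (by omega)]
  unfold pvRunB; rw [dif_pos (by omega)]
  unfold pvRunB; rw [dif_pos (by omega)]
  unfold pvRunB; rw [dif_neg (by omega)]
  rfl

-- value of the zero-writing loop
theorem pvFoldZero_getD : ∀ (l : List String) (d : PySem.Dict String Int) (k : String),
    (List.foldl (fun d k => d.insert k 0) d l).getD k 0 = if k ∈ l then 0 else d.getD k 0 := by
  intro l
  induction l with
  | nil => simp
  | cons a l ih =>
    intro d k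
    simp only [List.foldl_cons, ih, PySem.Dict.getD_insert, List.mem_cons]
    by_cases h1 : k ∈ l <;> by_cases h2 : k = a <;> simp [h1, h2]

-- the two zero-initialisations agree
theorem pvInit_eq (dictx : List (String × Int)) :
    (PySem.Dict.ofList dictx).keys.foldl (fun d k => d.insert k 0) (PySem.Dict.ofList dictx)
      = (PySem.Dict.ofList dictx).keys.foldl (fun d k => d.insert k 0) PySem.Dict.empty := by
  have hnd : (PySem.Dict.ofList dictx).keys.Nodup := PySem.Dict.nodup_keys_ofList dictx
  have hupd : ∀ s : PySem.Set String, s.Nodup → PySem.Set.update s s = s := by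
    intro s hs
    rw [PySem.Set.update_eq_append_filter, PySem.Set.ofList_eq_self_of_nodup _ hs]
    have hfil : List.filter (fun y => !s.contains y) s = [] := by
      rw [List.filter_eq_nil_iff]
      intro y hy
      simp [hy]
    rw [hfil, List.append_nil]
  have hkeysA : ((PySem.Dict.ofList dictx).keys.foldl (fun d k => d.insert k 0)
      (PySem.Dict.ofList dictx)).keys = (PySem.Dict.ofList dictx).keys := by
    rw [PySem.Dict.keys_foldl_insert _ (fun _ _ => 0)]
    exact hupd _ hnd
  have hkeysB : ((PySem.Dict.ofList dictx).keys.foldl (fun d k => d.insert k 0)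
      (PySem.Dict.empty : PySem.Dict String Int)).keys = (PySem.Dict.ofList dictx).keys := by
    rw [PySem.Dict.keys_foldl_insert _ (fun _ _ => 0), PySem.Dict.keys_empty,
      PySem.Set.update_nil_left, PySem.Set.ofList_eq_self_of_nodup _ hnd]
  have hndA : ((PySem.Dict.ofList dictx).keys.foldl (fun d k => d.insert k 0)
      (PySem.Dict.ofList dictx)).keys.Nodup := by rw [hkeysA]; exact hnd
  have hndB : ((PySem.Dict.ofList dictx).keys.foldl (fun d k => d.insert k 0)
      (PySem.Dict.empty : PySem.Dict String Int)).keys.Nodup := by rw [hkeysB]; exact hnd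
  apply PySem.Dict.ext
  conv_lhs => rw [PySem.Dict.items_eq_map_keys _ hndA 0]
  conv_rhs => rw [PySem.Dict.items_eq_map_keys _ hndB 0]
  rw [hkeysA, hkeysB]
  apply List.map_congr_left
  intro k hk
  rw [pvFoldZero_getD, pvFoldZero_getD, if_pos hk, if_pos hk]

-- ===== VERDICT (by name: the statement is the Claim_ definition above) =====
theorem factorizer_spec : Claim_equal_factorizer := by
  intro item dictx _hdom hpre
  unfold Spec_factorizer factorizer factorizer_alt
  dsimp only
  rw [pvInit_eq, pvAlt_runB]
  rw [pvMain item.natAbs item le_rfl hpre 0 (by omega) (by omega) _ (item.natAbs + 1) (item.natAbs + 1) (by omega) (by omega)]
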